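-- pv_equiv track=rewrite | github.com/zdx3578/ARC-AGI-3-Agents | agents/templates/active_inference/hypothesis_bank.py | _palette_delta_topk
-- ===== SOURCE A (Python) =====
-- def _color_value(cell_any: object) -> int:
--     if isinstance(cell_any, bool):
--         return int(cell_any)
--     if isinstance(cell_any, int):
--         return int(cell_any)
--     if isinstance(cell_any, float):
--         return int(cell_any)
--     if isinstance(cell_any, (list, tuple)):
--         if not cell_any:
--             return 0
--         return _color_value(cell_any[0])
--     try:
--         return int(cell_any)  # type: ignore[arg-type]
--     except Exception:
--         return 0
--
-- def _palette_delta_topk(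
--     previous_frame: list[list[int]],
--     current_frame: list[list[int]],
--     top_k: int = 5,
-- ) -> dict[str, int]:
--     prev_hist: dict[int, int] = {}
--     curr_hist: dict[int, int] = {}
--
--     for row in previous_frame:
--         for value in row:
--             color = _color_value(value)
--             prev_hist[color] = prev_hist.get(color, 0) + 1
--
--     for row in current_frame:
--         for value in row:
--             color = _color_value(value)
--             curr_hist[color] = curr_hist.get(color, 0) + 1
--
--     delta: list[tuple[int, int]] = []
--     for color in set(prev_hist.keys()) | set(curr_hist.keys()):
--         diff = int(curr_hist.get(color, 0) - prev_hist.get(color, 0))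
--         if diff != 0:
--             delta.append((color, diff))
--
--     delta.sort(key=lambda item: (abs(item[1]), item[0]), reverse=True)
--     return {str(color): int(diff) for (color, diff) in delta[:top_k]}
-- ===== SOURCE B (Python) =====
-- def _color_value(cell_any: object) -> int:
--     if isinstance(cell_any, bool):
--         return int(cell_any)
--     if isinstance(cell_any, int):
--         return int(cell_any)
--     if isinstance(cell_any, float):
--         return int(cell_any)
--     if isinstance(cell_any, (list, tuple)):
--         if not cell_any:
--             return 0
--         return _color_value(cell_any[0])
--     try:
--         return int(cell_any)  # type: ignore[arg-type]
--     except Exception: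
--         return 0
--
-- def _palette_delta_topk(
--     previous_frame: list[list[int]],
--     current_frame: list[list[int]],
--     top_k: int = 5,
-- ) -> dict[str, int]:
--     # Sort-and-scan instead of hashing: tag every previous-frame cell with -1 and
--     # every current-frame cell with +1, sort the tagged cells by color, and sum
--     # the signs of each contiguous run; no histogram dicts, no key-union pass.
--     tagged = sorted(
--         [(_color_value(v), -1) for row in previous_frame for v in row]
--         + [(_color_value(v), 1) for row in current_frame for v in row]
--     )
--     delta: list[tuple[int, int]] = []
--     run_color = None
--     run_sum = 0
--     for color, sign in tagged:
--         if color != run_color: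
--             if run_color is not None and run_sum != 0:
--                 delta.append((run_color, run_sum))
--             run_color, run_sum = color, sign
--         else:
--             run_sum += sign
--     if run_color is not None and run_sum != 0:
--         delta.append((run_color, run_sum))
--     delta.sort(key=lambda item: (abs(item[1]), item[0]), reverse=True)
--     return {str(color): int(diff) for (color, diff) in delta[:top_k]}
-- ===== Notes on version B (the rewrite author's own statement) =====
-- stated objective: alternative
-- what changed: B replaces A's two hash histograms plus key-union reconciliation by a sort-and-scan: it tags every previous cell with -1 and every current cell with +1, sorts the tagged cells by color, and sums the signs of each contiguous run to get the nonzero deltas, using no dicts at all.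
import Mathlib
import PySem

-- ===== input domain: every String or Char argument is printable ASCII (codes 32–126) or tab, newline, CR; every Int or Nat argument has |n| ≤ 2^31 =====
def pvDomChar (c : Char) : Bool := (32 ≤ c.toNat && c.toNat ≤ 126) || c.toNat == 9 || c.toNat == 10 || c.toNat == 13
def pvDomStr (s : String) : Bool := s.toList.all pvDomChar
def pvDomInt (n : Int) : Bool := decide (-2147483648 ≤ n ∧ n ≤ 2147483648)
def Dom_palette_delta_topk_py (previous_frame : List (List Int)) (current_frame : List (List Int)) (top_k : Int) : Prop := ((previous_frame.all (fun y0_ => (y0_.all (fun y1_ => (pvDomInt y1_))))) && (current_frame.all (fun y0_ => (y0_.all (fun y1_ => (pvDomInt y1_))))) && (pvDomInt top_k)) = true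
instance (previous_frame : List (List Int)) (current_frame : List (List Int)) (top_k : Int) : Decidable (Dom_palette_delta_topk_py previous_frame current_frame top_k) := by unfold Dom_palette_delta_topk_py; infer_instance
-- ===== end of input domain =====

-- B replaces A's two hash histograms plus key-union reconciliation by a sort-and-scan:
-- tag each previous cell -1 and each current cell +1, sort the tagged cells, sum the
-- signs of each contiguous run (no dicts); objective: alternative. Return value only.

-- ===== PORT A =====
-- _color_value: on the typed domain every cell is an int, so the 'isinstance(cell_any, int)'
-- branch fires and returns the value unchanged (exact on List (List Int) inputs).
def pvColorValueA (v : Int) : Int := v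

def palette_delta_topk_py (previous_frame : List (List Int)) (current_frame : List (List Int)) (top_k : Int) : List (String × Int) :=
  let prev_hist : PySem.Dict Int Int :=
    previous_frame.foldl (fun d row =>
      row.foldl (fun d v => d.insert (pvColorValueA v) (d.getD (pvColorValueA v) 0 + 1)) d) PySem.Dict.empty
  let curr_hist : PySem.Dict Int Int :=
    current_frame.foldl (fun d row =>
      row.foldl (fun d v => d.insert (pvColorValueA v) (d.getD (pvColorValueA v) 0 + 1)) d) PySem.Dict.empty
  let delta : List (Int × Int) :=
    (PySem.Set.union (PySem.Set.ofList prev_hist.keys) (PySem.Set.ofList curr_hist.keys)).foldl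
      (fun acc color =>
        let diff := curr_hist.getD color 0 - prev_hist.getD color 0
        if diff ≠ 0 then acc ++ [(color, diff)] else acc) []
  let sortedDelta := PySem.List.sorted2 delta (fun item => |item.2|) (fun item => item.1) true
  (PySem.List.slice sortedDelta none (some top_k)).map (fun p => (PySem.Int.toStr p.1, p.2))

-- ===== PORT B =====
def pvColorValueB (v : Int) : Int := v

-- one step of B's run-length scan over the sorted tagged list; state = (delta, run_color, run_sum)
def pvStepB (st : List (Int × Int) × Option Int × Int) (p : Int × Int) : List (Int × Int) × Option Int × Int :=
  if some p.1 ≠ st.2.1 then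
    ((if st.2.1.isSome ∧ st.2.2 ≠ 0 then st.1 ++ [(st.2.1.getD 0, st.2.2)] else st.1), some p.1, p.2)
  else (st.1, st.2.1, st.2.2 + p.2)

-- the trailing 'if run_color is not None and run_sum != 0: delta.append(...)' after the loop
def pvFinishB (st : List (Int × Int) × Option Int × Int) : List (Int × Int) :=
  if st.2.1.isSome ∧ st.2.2 ≠ 0 then st.1 ++ [(st.2.1.getD 0, st.2.2)] else st.1

def palette_delta_topk_py_alt (previous_frame : List (List Int)) (current_frame : List (List Int)) (top_k : Int) : List (String × Int) :=
  let tagged := PySem.List.sorted2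
    (previous_frame.flatMap (fun row => row.map (fun v => (pvColorValueB v, (-1 : Int)))) ++
     current_frame.flatMap (fun row => row.map (fun v => (pvColorValueB v, (1 : Int)))))
    (fun p => p.1) (fun p => p.2) false
  let delta := pvFinishB (tagged.foldl pvStepB ([], none, 0))
  let sortedDelta := PySem.List.sorted2 delta (fun item => |item.2|) (fun item => item.1) true
  (PySem.List.slice sortedDelta none (some top_k)).map (fun p => (PySem.Int.toStr p.1, p.2))

-- ===== PRECONDITION & SPEC =====
def Spec_palette_delta_topk_py (previous_frame : List (List Int)) (current_frame : List (List Int)) (top_k : Int) (out : List (String × Int)) : Prop := out = palette_delta_topk_py_alt previous_frame current_frame top_k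
instance (previous_frame : List (List Int)) (current_frame : List (List Int)) (top_k : Int) (out : List (String × Int)) : Decidable (Spec_palette_delta_topk_py previous_frame current_frame top_k out) := by unfold Spec_palette_delta_topk_py; infer_instance

-- ===== CLAIM =====
def Claim_equal_palette_delta_topk_py : Prop := ∀ (previous_frame : List (List Int)) (current_frame : List (List Int)) (top_k : Int), Dom_palette_delta_topk_py previous_frame current_frame top_k → Spec_palette_delta_topk_py previous_frame current_frame top_k (palette_delta_topk_py previous_frame current_frame top_k)

-- ===== LEMMAS AND PROOFS =====

-- append one pair if its value is nonzero (the shape both delta lists are made of)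
def pvEmit (c v : Int) : List (Int × Int) := if v ≠ 0 then [(c, v)] else []

-- reference description of B's run scan: first color's total, then the rest
def pvRuns : List (Int × Int) → List (Int × Int)
  | [] => []
  | p :: t =>
      pvEmit p.1 (p.2 + ((t.filter (fun q => q.1 == p.1)).map (·.2)).sum) ++
        pvRuns (t.filter (fun q => q.1 != p.1))
  termination_by l => l.length
  decreasing_by
    simpa using Nat.lt_succ_of_le ((List.length_filter_le _ _).trans (List.length_attach (l := t)).le)

theorem pvEmit_mem (c v x y : Int) :
    (x, y) ∈ pvEmit c v ↔ (v ≠ 0 ∧ x = c ∧ y = v) := by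
  unfold pvEmit; split <;> simp_all

-- sorted2 is sorted with the lexicographic product key
theorem sorted2_eq_sorted_toLex (xs : List (Int × Int)) (k1 k2 : Int × Int → Int) (rev : Bool) :
    PySem.List.sorted2 xs k1 k2 rev
      = PySem.List.sorted xs (fun x => toLex (k1 x, k2 x)) rev := by
  have hlt : ∀ a b : Int × Int,
      (decide (k1 a < k1 b) || (!decide (k1 b < k1 a) && decide (k2 a < k2 b)))
        = decide (toLex (k1 a, k2 a) < toLex (k1 b, k2 b)) := by
    intro a b
    rcases lt_trichotomy (k1 a) (k1 b) with h | h | h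
    · simp [Prod.Lex.toLex_lt_toLex, h, asymm h]
    · simp [Prod.Lex.toLex_lt_toLex, h]
    · simp [Prod.Lex.toLex_lt_toLex, h, asymm h, h.ne']
  have hfun : (fun a b : Int × Int => decide (k1 a < k1 b) || (!decide (k1 b < k1 a) && decide (k2 a < k2 b)))
      = (fun a b : Int × Int => decide (toLex (k1 a, k2 a) < toLex (k1 b, k2 b))) := by
    funext a b; exact hlt a b
  have hfun2 : (fun a b : Int × Int => decide (k1 b < k1 a) || (!decide (k1 a < k1 b) && decide (k2 b < k2 a)))
      = (fun a b : Int × Int => decide (toLex (k1 b, k2 b) < toLex (k1 a, k2 a))) := by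
    funext a b; exact hlt b a
  unfold PySem.List.sorted2 PySem.List.sorted
  cases rev <;> simp only [hfun, hfun2]

-- B's scan over a fst-sorted list computes pvRuns
theorem scan_spec (T : List (Int × Int)) (delta : List (Int × Int)) (c s : Int)
    (hs : T.Pairwise (fun a b => a.1 ≤ b.1)) (hc : ∀ p ∈ T, c ≤ p.1) :
    pvFinishB (T.foldl pvStepB (delta, some c, s)) =
      delta ++ pvEmit c (s + ((T.filter (fun q => q.1 == c)).map (·.2)).sum) ++
        pvRuns (T.filter (fun q => q.1 != c)) := by
  induction T generalizing delta c s with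
  | nil =>
      by_cases hsz : s = 0 <;> simp [pvFinishB, pvEmit, pvRuns, hsz]
  | cons p t ih =>
      have hst : t.Pairwise (fun a b => a.1 ≤ b.1) := hs.of_cons
      have hhead : ∀ q ∈ t, p.1 ≤ q.1 := fun q hq => (List.pairwise_cons.mp hs).1 q hq
      by_cases hpc : p.1 = c
      · have hstep : pvStepB (delta, some c, s) p = (delta, some c, s + p.2) := by
          simp [pvStepB, hpc]
        rw [List.foldl_cons, hstep,
            ih delta c (s + p.2) hst (fun q hq => hc q (List.mem_cons_of_mem _ hq))]
        simp [hpc, add_assoc]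
      · have hltc : c < p.1 := lt_of_le_of_ne (hc p List.mem_cons_self) (Ne.symm hpc)
        have htne : ∀ q ∈ t, q.1 ≠ c := fun q hq => (lt_of_lt_of_le hltc (hhead q hq)).ne'
        have hfe : t.filter (fun q => q.1 != c) = t :=
          List.filter_eq_self.mpr (fun q hq => by simpa using htne q hq)
        have hfn : t.filter (fun q => q.1 == c) = [] :=
          List.filter_eq_nil_iff.mpr (fun q hq => by simpa using htne q hq)
        have hstep : pvStepB (delta, some c, s) p = (delta ++ pvEmit c s, some p.1, p.2) := by
          by_cases hsz : s = 0 <;> simp [pvStepB, pvEmit, hpc, hsz]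
        rw [List.foldl_cons, hstep, ih (delta ++ pvEmit c s) p.1 p.2 hst hhead]
        have h1 : ((p.1 == c) = false) := by simpa using hpc
        have h2 : ((p.1 != c) = true) := by simpa using hpc
        rw [List.filter_cons, List.filter_cons, h1, h2]
        simp only [Bool.false_eq_true, if_false, if_true]
        rw [hfe, hfn, pvRuns]
        simp [List.append_assoc]

theorem scan_top (T : List (Int × Int)) (hs : T.Pairwise (fun a b => a.1 ≤ b.1)) :
    pvFinishB (T.foldl pvStepB ([], none, 0)) = pvRuns T := by
  cases T with
  | nil => simp [pvFinishB, pvRuns]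
  | cons p t =>
      have hstep : pvStepB ([], none, 0) p = ([], some p.1, p.2) := by
        simp [pvStepB]
      rw [List.foldl_cons, hstep,
          scan_spec t [] p.1 p.2 hs.of_cons (fun q hq => (List.pairwise_cons.mp hs).1 q hq),
          pvRuns]
      simp

theorem mem_pvRuns (T : List (Int × Int)) (c d : Int) :
    (c, d) ∈ pvRuns T ↔
      (c ∈ T.map (·.1) ∧ d = ((T.filter (fun q => q.1 == c)).map (·.2)).sum ∧ d ≠ 0) := by
  induction T using pvRuns.induct with
  | case1 => simp [pvRuns]
  | case2 p t ih =>
      rw [List.unattach_filter (g := fun q => q.1 != p.1) (hf := fun x h => rfl),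
          List.unattach_attach] at ih
      rw [pvRuns, List.mem_append, pvEmit_mem, ih]
      by_cases hcp : c = p.1
      · subst hcp
        have hnm : p.1 ∉ (t.filter (fun q => q.1 != p.1)).map (·.1) := by
          intro hm
          rcases List.mem_map.mp hm with ⟨q, hq, hqc⟩
          have hg := (List.mem_filter.mp hq).2
          simp [hqc] at hg
        rw [List.filter_cons]
        have hps : ((p.1 == p.1) = true) := by simp
        rw [hps]
        simp only [if_true, List.map_cons, List.sum_cons, List.map_cons, List.mem_cons]
        constructor
        · rintro (⟨hA, _, rfl⟩ | ⟨h, _, _⟩)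
          · exact ⟨Or.inl trivial, rfl, hA⟩
          · exact absurd h hnm
        · rintro ⟨_, rfl, hd⟩
          exact Or.inl ⟨hd, trivial, rfl⟩
      · have hmf : c ∈ (t.filter (fun q => q.1 != p.1)).map (·.1) ↔ c ∈ t.map (·.1) := by
          constructor
          · intro h
            rcases List.mem_map.mp h with ⟨q, hq, rfl⟩
            exact List.mem_map.mpr ⟨q, (List.mem_filter.mp hq).1, rfl⟩
          · intro h
            rcases List.mem_map.mp h with ⟨q, hq, rfl⟩
            exact List.mem_map.mpr ⟨q, List.mem_filter.mpr ⟨hq, by simpa using hcp⟩, rfl⟩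
        have hff : (t.filter (fun q => q.1 != p.1)).filter (fun q => q.1 == c)
            = t.filter (fun q => q.1 == c) := by
          rw [List.filter_filter]
          apply List.filter_congr
          intro a _
          by_cases h : a.1 = c
          · simp [h, hcp]
          · simp [h]
        have hpc' : ((p.1 == c) = false) := by simpa using (fun h => hcp h.symm)
        rw [List.filter_cons, hpc']
        simp only [Bool.false_eq_true, if_false, List.map_cons, List.mem_cons, hff, hmf]
        constructor
        · rintro (⟨_, rfl, _⟩ | ⟨h, rfl, hd⟩)
          · exact absurd rfl hcp
          · exact ⟨Or.inr h, rfl, hd⟩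
        · rintro ⟨h | h, rfl, hd⟩
          · exact absurd h hcp
          · exact Or.inr ⟨h, rfl, hd⟩

theorem fst_mem_of_mem_pvRuns (T : List (Int × Int)) (x : Int)
    (hx : x ∈ (pvRuns T).map (·.1)) : x ∈ T.map (·.1) := by
  rcases List.mem_map.mp hx with ⟨⟨c, d⟩, hm, hxe⟩
  subst hxe
  exact ((mem_pvRuns T c d).mp hm).1

theorem nodup_fst_pvRuns (T : List (Int × Int)) : ((pvRuns T).map (·.1)).Nodup := by
  induction T using pvRuns.induct with
  | case1 => simp [pvRuns]
  | case2 p t ih =>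
      rw [List.unattach_filter (g := fun q => q.1 != p.1) (hf := fun x h => rfl),
          List.unattach_attach] at ih
      rw [pvRuns, List.map_append, List.nodup_append]
      refine ⟨?_, ih, ?_⟩
      · unfold pvEmit; split <;> simp
      · intro x hx1 y hy2 hxy
        subst hxy
        have hxp : x = p.1 := by
          unfold pvEmit at hx1; revert hx1; split <;> simp_all
        subst hxp
        have hmem := fst_mem_of_mem_pvRuns _ _ hy2
        rcases List.mem_map.mp hmem with ⟨q, hq, hqc⟩
        have hg := (List.mem_filter.mp hq).2
        simp [hqc] at hg

-- sort of a permutation: the (|diff|, color) key separates a list with distinct colors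
theorem sorted2_rev_eq_of_perm (xs ys : List (Int × Int)) (h : xs.Perm ys)
    (hx : (xs.map (·.1)).Nodup) :
    PySem.List.sorted2 xs (fun item => |item.2|) (fun item => item.1) true
      = PySem.List.sorted2 ys (fun item => |item.2|) (fun item => item.1) true := by
  rw [sorted2_eq_sorted_toLex, sorted2_eq_sorted_toLex]
  set g : Int × Int → Lex (Int × Int) := fun x => toLex (|x.2|, x.1) with hg
  have hperm : (PySem.List.sorted xs g true).Perm xs := PySem.List.sorted_perm xs g true
  have hpair : (PySem.List.sorted xs g true).Pairwise (fun a b => g b ≤ g a) :=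
    PySem.List.sorted_pairwise_rev xs g
  have hnod : ((PySem.List.sorted xs g true).map (·.1)).Nodup :=
    ((hperm.map (·.1)).nodup_iff).mpr hx
  have hfstne : (PySem.List.sorted xs g true).Pairwise (fun a b => a.1 ≠ b.1) :=
    List.pairwise_map.mp hnod
  have hstrict : (PySem.List.sorted xs g true).Pairwise (fun a b => g b < g a) := by
    refine (hpair.and hfstne).imp ?_
    rintro a b ⟨hle, hne⟩
    refine lt_of_le_of_ne hle (fun heq => hne ?_)
    have : (|b.2|, b.1) = (|a.2|, a.1) := toLex_inj.mp heq
    exact ((Prod.mk.injEq _ _ _ _).mp this).2.symm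
  exact (PySem.List.sorted_rev_eq_of_perm_of_pairwise_gt xs (PySem.List.sorted xs g true) g hperm hstrict).trans
    (PySem.List.sorted_rev_eq_of_perm_of_pairwise_gt ys (PySem.List.sorted xs g true) g (hperm.trans h) hstrict).symm

-- main equivalence
theorem palette_delta_topk_eq (previous_frame current_frame : List (List Int)) (top_k : Int) :
    palette_delta_topk_py previous_frame current_frame top_k
      = palette_delta_topk_py_alt previous_frame current_frame top_k := by
  classical
  unfold palette_delta_topk_py palette_delta_topk_py_alt pvColorValueA pvColorValueB
  simp only [← List.foldl_flatten]
  set P := previous_frame.flatten with hP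
  set C := current_frame.flatten with hC
  -- A's histograms are counters
  rw [PySem.Dict.foldl_insert_getD_add_one_eq_counter, PySem.Dict.foldl_insert_getD_add_one_eq_counter]
  -- B's tagged list
  have hPf : previous_frame.flatMap (fun row => row.map (fun v => (v, (-1 : Int))))
      = P.map (fun v => (v, (-1 : Int))) := by
    rw [List.flatMap_def, hP, List.map_flatten]
  have hCf : current_frame.flatMap (fun row => row.map (fun v => (v, (1 : Int))))
      = C.map (fun v => (v, (1 : Int))) := by
    rw [List.flatMap_def, hC, List.map_flatten]
  rw [hPf, hCf]
  set tg : List (Int × Int) := P.map (fun v => (v, (-1 : Int))) ++ C.map (fun v => (v, (1 : Int))) with htg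
  rw [sorted2_eq_sorted_toLex tg (fun p => p.1) (fun p => p.2) false]
  set g0 : Int × Int → Lex (Int × Int) := fun x => toLex (x.1, x.2) with hg0
  set T : List (Int × Int) := PySem.List.sorted tg g0 false with hT
  have hTperm : T.Perm tg := PySem.List.sorted_perm tg g0 false
  have hTpair : T.Pairwise (fun a b => a.1 ≤ b.1) := by
    refine (PySem.List.sorted_pairwise tg g0).imp ?_
    intro a b hab
    rcases Prod.Lex.toLex_le_toLex.mp hab with h | h
    · exact le_of_lt h
    · exact le_of_eq h.1
  rw [scan_top T hTpair]
  -- A's delta loop is filter-then-map over the key union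
  rw [PySem.List.foldl_append_ite
      (p := fun color => (PySem.Dict.counter C).getD color 0 - (PySem.Dict.counter P).getD color 0 ≠ 0)
      (f := fun color => (color, (PySem.Dict.counter C).getD color 0 - (PySem.Dict.counter P).getD color 0))]
  rw [List.nil_append]
  set f : Int → Int := fun x => (C.count x : Int) - (P.count x : Int) with hf
  have hgetD : ∀ x : Int, (PySem.Dict.counter C).getD x 0 - (PySem.Dict.counter P).getD x 0 = f x := by
    intro x; rw [PySem.Dict.getD_counter, PySem.Dict.getD_counter]
  set U : List Int := PySem.Set.union (PySem.Set.ofList (PySem.Dict.counter P).keys)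
      (PySem.Set.ofList (PySem.Dict.counter C).keys) with hU
  have hUmem : ∀ x : Int, x ∈ U ↔ (x ∈ P ∨ x ∈ C) := by
    intro x
    rw [hU, PySem.Dict.keys_counter, PySem.Dict.keys_counter,
        PySem.Set.ofList_eq_self_of_nodup _ (PySem.Set.nodup_ofList P),
        PySem.Set.ofList_eq_self_of_nodup _ (PySem.Set.nodup_ofList C),
        PySem.Set.mem_union]
    simp [PySem.Set.mem_ofList]
  have hUnodup : U.Nodup := by
    rw [hU, PySem.Dict.keys_counter, PySem.Dict.keys_counter,
        PySem.Set.ofList_eq_self_of_nodup _ (PySem.Set.nodup_ofList P),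
        PySem.Set.ofList_eq_self_of_nodup _ (PySem.Set.nodup_ofList C)]
    exact PySem.Set.nodup_union _ _ (PySem.Set.nodup_ofList P)
  set LA : List (Int × Int) := (U.filter (fun color =>
      decide ((PySem.Dict.counter C).getD color 0 - (PySem.Dict.counter P).getD color 0 ≠ 0))).map
      (fun color => (color, (PySem.Dict.counter C).getD color 0 - (PySem.Dict.counter P).getD color 0)) with hLA
  -- sums over the tagged list
  have hsum : ∀ c : Int, ((T.filter (fun q => q.1 == c)).map (·.2)).sum = f c := by
    intro c
    have hp : ((T.filter (fun q => q.1 == c)).map (·.2)).Perm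
        ((tg.filter (fun q => q.1 == c)).map (·.2)) := (hTperm.filter _).map _
    rw [hp.sum_eq, htg, List.filter_append, List.filter_map, List.filter_map]
    simp only [Function.comp_def]
    rw [List.map_append, List.map_map, List.map_map]
    simp only [Function.comp_def]
    rw [List.sum_append, PySem.List.sum_map_const_int, PySem.List.sum_map_const_int]
    rw [hf]
    rw [← List.count_eq_length_filter, ← List.count_eq_length_filter]
    ring
  -- membership characterisations
  have hmemB : ∀ c d : Int, (c, d) ∈ pvRuns T ↔ ((c ∈ P ∨ c ∈ C) ∧ d = f c ∧ d ≠ 0) := by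
    intro c d
    rw [mem_pvRuns, hsum]
    have hmfst : c ∈ T.map (·.1) ↔ (c ∈ P ∨ c ∈ C) := by
      rw [(hTperm.map (·.1)).mem_iff, htg, List.map_append, List.map_map, List.map_map]
      simp [Function.comp_def]
    rw [hmfst]
  have hLAf : LA = (U.filter (fun color => decide (f color ≠ 0))).map (fun color => (color, f color)) := by
    rw [hLA]
    simp only [hgetD]
  have hmemA : ∀ c d : Int, (c, d) ∈ LA ↔ ((c ∈ P ∨ c ∈ C) ∧ d = f c ∧ d ≠ 0) := by
    intro c d
    rw [hLAf]
    simp only [List.mem_map, List.mem_filter]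
    constructor
    · rintro ⟨c', ⟨hcu, hdec⟩, heq⟩
      obtain ⟨rfl, rfl⟩ : c' = c ∧ f c' = d := ⟨congrArg Prod.fst heq, congrArg Prod.snd heq⟩
      exact ⟨(hUmem c').mp hcu, rfl, of_decide_eq_true hdec⟩
    · rintro ⟨hm, rfl, hd⟩
      exact ⟨c, ⟨(hUmem c).mpr hm, decide_eq_true hd⟩, rfl⟩
  -- both lists have distinct colors
  have hnodA : (LA.map (·.1)).Nodup := by
    rw [hLAf, List.map_map]
    have hid : ((fun p : Int × Int => p.1) ∘ fun color => (color, f color)) = id := rfl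
    rw [hid, List.map_id]
    exact hUnodup.filter _
  have hnodB : ((pvRuns T).map (·.1)).Nodup := nodup_fst_pvRuns T
  -- hence they are permutations of each other
  have hperm : LA.Perm (pvRuns T) := by
    refine (List.perm_ext_iff_of_nodup (List.Nodup.of_map _ hnodA) (List.Nodup.of_map _ hnodB)).mpr ?_
    rintro ⟨c, d⟩
    rw [hmemA, hmemB]
  rw [sorted2_rev_eq_of_perm LA (pvRuns T) hperm hnodA]

-- ===== VERDICT =====
theorem palette_delta_topk_py_spec : Claim_equal_palette_delta_topk_py := by
  intro previous_frame current_frame top_k _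
  unfold Spec_palette_delta_topk_py
  exact palette_delta_topk_eq previous_frame current_frame top_k
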